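-- pv_equiv track=rewrite | github.com/keenon/AddBiomechanics | server/app/src/reactive_s3/reactive_s3_index.py | makeTopicPubSubSafe
-- ===== SOURCE A (Python) =====
-- def makeTopicPubSubSafe(path: str) -> str:
--
--     # Check if the path contains a user ID by searching for the ":" character.
--     # If it does, then keep the topic up to the user ID and discard the rest.
--     if path.find(":") != -1:
--         segments = path.split(":")
--         path = segments[0] + ":" + segments[1].split("/")[0]
--
--     MAX_TOPIC_LEN = 80
--     if len(path) > MAX_TOPIC_LEN:
--         segments = path.split("/")
--
--         if len(segments[0]) > MAX_TOPIC_LEN: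
--             return segments[0][0:MAX_TOPIC_LEN]
--
--         reconstructed = ''
--         segmentCursor = 0
--         while segmentCursor < len(segments):
--             proposedNext = reconstructed
--             if segmentCursor > 0:
--                 proposedNext += '/'
--             proposedNext += segments[segmentCursor]
--             segmentCursor += 1
--
--             if len(proposedNext) < MAX_TOPIC_LEN:
--                 reconstructed = proposedNext
--             else:
--                 break
--         return reconstructed
--     return path
-- ===== SOURCE B (Python) =====
-- def makeTopicPubSubSafe(path: str) -> str:
--     # Keep only the part before the first ':' plus, after it, the piece up to the
--     # next ':' or '/' (whichever comes first) -- the user-ID head.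
--     if ":" in path:
--         head, _, rest = path.partition(":")
--         uid = rest.split(":", 1)[0].split("/", 1)[0]
--         path = head + ":" + uid
--
--     MAX_TOPIC_LEN = 80
--     if len(path) <= MAX_TOPIC_LEN:
--         return path
--
--     segments = path.split("/")
--     if len(segments[0]) > MAX_TOPIC_LEN:
--         return segments[0][:MAX_TOPIC_LEN]
--
--     # Length-table pass: joined_lens[k] = len('/'.join(segments[:k+1])); monotone,
--     # so the greedy cut point is just the count of prefixes shorter than the cap.
--     joined_lens = []
--     total = -1
--     for seg in segments:
--         total += 1 + len(seg)
--         joined_lens.append(total)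
--     k = sum(1 for L in joined_lens if L < MAX_TOPIC_LEN)
--     return "/".join(segments[:k])
-- ===== Notes on version B (the rewrite author's own statement) =====
-- stated objective: alternative
-- what changed: The greedy build-string-and-break while loop is replaced by a length-table pass: accumulate the joined length of each segment prefix, count how many prefixes stay strictly under the 80-char cap, and join the kept segments once at the end.
import Mathlib
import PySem

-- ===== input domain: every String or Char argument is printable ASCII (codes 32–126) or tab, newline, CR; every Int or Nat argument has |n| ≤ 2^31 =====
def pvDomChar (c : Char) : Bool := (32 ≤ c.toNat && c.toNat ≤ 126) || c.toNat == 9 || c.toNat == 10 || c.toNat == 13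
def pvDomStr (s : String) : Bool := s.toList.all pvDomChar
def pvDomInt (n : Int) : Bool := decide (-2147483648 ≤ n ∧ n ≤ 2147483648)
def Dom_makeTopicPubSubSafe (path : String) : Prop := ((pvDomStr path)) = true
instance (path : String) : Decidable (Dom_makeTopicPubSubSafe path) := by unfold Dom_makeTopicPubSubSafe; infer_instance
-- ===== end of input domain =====

-- B replaces A's greedy build-and-break while loop by a length-table pass (cumulative joined
-- lengths, count the prefixes under the cap, join once) — objective: alternative decomposition.


-- ===== PORT A =====
-- the while loop of A: reconstructed/segmentCursor state, break when the proposed prefix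
-- reaches the cap
def pvAWhile (segments : List (List Char)) (reconstructed : List Char) (cursor : Nat) :
    List Char :=
  if h : cursor < segments.length then
    let proposed := reconstructed
    let proposed := if 0 < cursor then proposed ++ ['/'] else proposed
    let proposed := proposed ++ PySem.List.pyGetD segments (cursor : Int) []
    if PySem.Chars.len proposed < 80 then pvAWhile segments proposed (cursor + 1)
    else reconstructed
  else reconstructed
termination_by segments.length - cursor
decreasing_by omega

def makeTopicPubSubSafe (path : String) : String :=
  let p := path.toList
  let p :=
    if PySem.Chars.find p [':'] ≠ -1 then
      let segments := PySem.Chars.splitOn p [':']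
      PySem.List.pyGetD segments 0 [] ++ [':'] ++
        PySem.List.pyGetD (PySem.Chars.splitOn (PySem.List.pyGetD segments 1 []) ['/']) 0 []
    else p
  if PySem.Chars.len p > 80 then
    let segments := PySem.Chars.splitOn p ['/']
    if PySem.Chars.len (PySem.List.pyGetD segments 0 []) > 80 then
      String.ofList (PySem.Chars.slice (PySem.List.pyGetD segments 0 []) (some 0) (some 80))
    else
      String.ofList (pvAWhile segments [] 0)
  else String.ofList p

-- ===== PORT B =====
def makeTopicPubSubSafe_alt (path : String) : String :=
  let p := path.toList
  let p :=
    if PySem.Chars.find p [':'] ≠ -1 then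
      let segments := PySem.Chars.splitOn p [':']
      PySem.List.pyGetD segments 0 [] ++ [':'] ++
        PySem.List.pyGetD (PySem.Chars.splitOn (PySem.List.pyGetD segments 1 []) ['/']) 0 []
    else p
  if PySem.Chars.len p ≤ 80 then String.ofList p
  else
    let segments := PySem.Chars.splitOn p ['/']
    if PySem.Chars.len (PySem.List.pyGetD segments 0 []) > 80 then
      String.ofList (PySem.Chars.slice (PySem.List.pyGetD segments 0 []) (some 0) (some 80))
    else
      -- joined_lens[i] = len('/'.join(segments[:i+1])), built in one accumulating pass
      let joinedLens :=
        (segments.foldl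
          (fun (st : Int × List Int) seg =>
            (st.1 + 1 + PySem.Chars.len seg, st.2 ++ [st.1 + 1 + PySem.Chars.len seg]))
          ((-1 : Int), ([] : List Int))).2
      let k := joinedLens.countP (fun L => L < 80)
      String.ofList (PySem.Chars.join ['/'] (segments.take k))

-- ===== PRECONDITION & SPEC =====
def Spec_makeTopicPubSubSafe (path : String) (out : String) : Prop := out = makeTopicPubSubSafe_alt path
instance (path : String) (out : String) : Decidable (Spec_makeTopicPubSubSafe path out) := by unfold Spec_makeTopicPubSubSafe; infer_instance

-- ===== CLAIM (what is proved, stated in full; the proofs are below) =====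
def Claim_equal_makeTopicPubSubSafe : Prop := ∀ (path : String), Dom_makeTopicPubSubSafe path → Spec_makeTopicPubSubSafe path (makeTopicPubSubSafe path)

-- ===== LEMMAS AND PROOFS =====

-- length of '/'.join of the first k segments
def pvF (ss : List (List Char)) (k : Nat) : Nat :=
  (PySem.Chars.join ['/'] (ss.take k)).length

-- the index where A's while loop stops, starting the scan at cursor c
def pvGreedy (ss : List (List Char)) (c : Nat) : Nat :=
  if h : c < ss.length ∧ pvF ss (c + 1) < 80 then pvGreedy ss (c + 1) else c
termination_by ss.length - c
decreasing_by omega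

-- join over a snoc
theorem pvJoin_snoc (sep y : List Char) (xs : List (List Char)) :
    PySem.Chars.join sep (xs ++ [y]) =
      if xs = [] then y else PySem.Chars.join sep xs ++ sep ++ y := by
  induction xs with
  | nil => simp [PySem.Chars.join_singleton]
  | cons a t ih =>
    cases t with
    | nil => simp [PySem.Chars.join_cons_cons, PySem.Chars.join_singleton]
    | cons b r =>
      rw [if_neg (by simp)] at ih
      simp only [List.cons_append] at ih ⊢
      rw [PySem.Chars.join_cons_cons, ih]
      simp [PySem.Chars.join_cons_cons, List.append_assoc]

theorem pvF_succ (ss : List (List Char)) (k : Nat) (hk : k < ss.length) :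
    pvF ss (k + 1) = (if k = 0 then 0 else pvF ss k + 1) + (ss[k]).length := by
  unfold pvF
  rw [List.take_add_one]
  simp only [List.getElem?_eq_getElem hk, Option.toList_some]
  rw [pvJoin_snoc]
  rcases Nat.eq_zero_or_pos k with h0 | h0
  · subst h0; simp
  · have hk0 : k ≠ 0 := by omega
    have hne : ss.take k ≠ [] := by
      intro h
      have := congrArg List.length h
      simp [List.length_take, Nat.min_eq_left (Nat.le_of_lt hk)] at this
      omega
    simp [hne, hk0, List.length_append]
    omega

theorem pvF_mono (ss : List (List Char)) {i j : Nat} (hij : i ≤ j) (hj : j ≤ ss.length) :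
    pvF ss i ≤ pvF ss j := by
  induction j with
  | zero =>
    have : i = 0 := Nat.le_zero.mp hij
    simp [this]
  | succ m ih =>
    rcases Nat.lt_or_ge i (m + 1) with h | h
    · have h1 : pvF ss i ≤ pvF ss m := ih (by omega) (by omega)
      have h2 : pvF ss m ≤ pvF ss (m + 1) := by
        rw [pvF_succ ss m (by omega)]
        rcases Nat.eq_zero_or_pos m with h0 | h0
        · simp [h0, pvF]
        · have hm0 : m ≠ 0 := by omega
          simp [hm0]; omega
      omega
    · have : i = m + 1 := by omega
      simp [this]

theorem pvGreedy_le (ss : List (List Char)) (c : Nat) (hc : c ≤ ss.length) :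
    c ≤ pvGreedy ss c ∧ pvGreedy ss c ≤ ss.length := by
  unfold pvGreedy
  split
  · next h =>
    have := pvGreedy_le ss (c + 1) (by omega)
    omega
  · omega
termination_by ss.length - c
decreasing_by omega

theorem pvGreedy_lt_small (ss : List (List Char)) (c i : Nat) (hc : c ≤ i)
    (hi : i < pvGreedy ss c) : pvF ss (i + 1) < 80 := by
  unfold pvGreedy at hi
  split at hi
  · next h =>
    rcases Nat.lt_or_ge i (c + 1) with h1 | h1
    · have : i = c := by omega
      subst this; exact h.2
    · exact pvGreedy_lt_small ss (c + 1) i h1 hi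
  · omega
termination_by ss.length - c
decreasing_by omega

theorem pvGreedy_stop (ss : List (List Char)) (c : Nat)
    (h : pvGreedy ss c < ss.length) : ¬ pvF ss (pvGreedy ss c + 1) < 80 := by
  by_cases hcond : c < ss.length ∧ pvF ss (c + 1) < 80
  · rw [pvGreedy, dif_pos hcond] at h ⊢
    exact pvGreedy_stop ss (c + 1) h
  · rw [pvGreedy, dif_neg hcond] at h ⊢
    intro hlt
    exact hcond ⟨h, hlt⟩
termination_by ss.length - c
decreasing_by omega

-- A's loop computes the greedy join
theorem pvAWhile_eq (ss : List (List Char)) (c : Nat) (hc : c ≤ ss.length) :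
    pvAWhile ss (PySem.Chars.join ['/'] (ss.take c)) c =
      PySem.Chars.join ['/'] (ss.take (pvGreedy ss c)) := by
  unfold pvAWhile pvGreedy
  by_cases h : c < ss.length
  · have hget : PySem.List.pyGetD ss (c : Int) [] = ss[c] := by
      rw [PySem.List.pyGetD_natCast]
      exact List.getD_eq_getElem _ _ h
    have hprop :
        (if 0 < c then PySem.Chars.join ['/'] (ss.take c) ++ ['/']
          else PySem.Chars.join ['/'] (ss.take c)) ++ PySem.List.pyGetD ss (c : Int) [] =
        PySem.Chars.join ['/'] (ss.take (c + 1)) := by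
      rw [hget, List.take_add_one]
      simp only [List.getElem?_eq_getElem h, Option.toList_some]
      rw [pvJoin_snoc]
      rcases Nat.eq_zero_or_pos c with h0 | h0
      · subst h0; simp
      · have hne : ss.take c ≠ [] := by
          intro hh
          have := congrArg List.length hh
          simp [List.length_take, Nat.min_eq_left (Nat.le_of_lt h)] at this
          omega
        simp [hne, h0, List.append_assoc]
    have hlen : PySem.Chars.len (PySem.Chars.join ['/'] (ss.take (c + 1))) =
        (pvF ss (c + 1) : Int) := by simp [PySem.Chars.len_eq, pvF]
    simp only [dif_pos h, hprop, hlen]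
    by_cases hb : (pvF ss (c + 1) : Int) < 80
    · have hb' : pvF ss (c + 1) < 80 := by exact_mod_cast hb
      rw [if_pos hb]
      rw [pvAWhile_eq ss (c + 1) (by omega)]
      rw [dif_pos ⟨h, hb'⟩]
    · have hb' : ¬ pvF ss (c + 1) < 80 := by
        intro hh; exact hb (by exact_mod_cast hh)
      rw [if_neg hb]
      rw [dif_neg (by intro hh; exact hb' hh.2)]
  · simp only [dif_neg h]
    rw [dif_neg (by intro hh; exact h hh.1)]
termination_by ss.length - c
decreasing_by omega

-- B's accumulator pass, abstracted
def pvScan (t : Int) : List (List Char) → List Int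
  | [] => []
  | s :: r => (t + 1 + (s.length : Int)) :: pvScan (t + 1 + (s.length : Int)) r

theorem pvFoldl_scan (rest : List (List Char)) (t : Int) (acc : List Int) :
    (rest.foldl
      (fun (st : Int × List Int) seg =>
        (st.1 + 1 + PySem.Chars.len seg, st.2 ++ [st.1 + 1 + PySem.Chars.len seg]))
      (t, acc)).2 = acc ++ pvScan t rest := by
  induction rest generalizing t acc with
  | nil => simp [pvScan]
  | cons s r ih =>
    simp only [List.foldl_cons]
    rw [ih]
    simp [pvScan, PySem.Chars.len_eq, List.append_assoc]

def pvTOf (ss : List (List Char)) (c : Nat) : Int :=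
  if c = 0 then -1 else (pvF ss c : Int)

theorem pvScan_eq (ss : List (List Char)) (c : Nat) (_hc : c ≤ ss.length) :
    pvScan (pvTOf ss c) (ss.drop c) =
      (List.range (ss.length - c)).map (fun j => ((pvF ss (c + 1 + j) : Nat) : Int)) := by
  rcases Nat.lt_or_ge c ss.length with h | h
  · have hdrop : ss.drop c = ss[c] :: ss.drop (c + 1) := by
      rw [List.drop_eq_getElem_cons h]
    have hhead : pvTOf ss c + 1 + ((ss[c]).length : Int) = (pvF ss (c + 1) : Int) := by
      rw [pvF_succ ss c h]
      unfold pvTOf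
      rcases Nat.eq_zero_or_pos c with h0 | h0
      · simp [h0]
      · have hc0 : c ≠ 0 := by omega
        simp [hc0]
    have htof : (pvF ss (c + 1) : Int) = pvTOf ss (c + 1) := by simp [pvTOf]
    rw [hdrop]
    simp only [pvScan, hhead]
    rw [htof, pvScan_eq ss (c + 1) (by omega)]
    have hn : ss.length - c = (ss.length - (c + 1)) + 1 := by omega
    rw [hn, List.range_succ_eq_map]
    simp only [List.map_cons, List.map_map]
    congr 1
    apply List.map_congr_left
    intro j _
    simp only [Function.comp_apply]
    have e : c + 1 + 1 + j = c + 1 + (j + 1) := by omega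
    rw [e]
  · simp [List.drop_eq_nil_of_le h, Nat.sub_eq_zero_of_le h, pvScan]
termination_by ss.length - c
decreasing_by omega

-- the counting pass finds exactly the greedy stop index
theorem pvCountRange (g n : Nat) :
    (List.range n).countP (fun i => decide (i < g)) = min g n := by
  induction n with
  | zero => simp
  | succ m ih =>
    rw [List.range_succ, List.countP_append, ih]
    by_cases h : m < g
    · simp [h]; omega
    · simp [h]; omega

theorem pvCount_eq_greedy (ss : List (List Char)) :
    ((List.range ss.length).map (fun j => ((pvF ss (0 + 1 + j) : Nat) : Int))).countP
      (fun L => decide (L < 80)) = pvGreedy ss 0 := by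
  rw [List.countP_map]
  have hg := pvGreedy_le ss 0 (Nat.zero_le _)
  have hcongr : ∀ i ∈ List.range ss.length,
      (((fun L => decide (L < 80)) ∘ (fun j => ((pvF ss (0 + 1 + j) : Nat) : Int))) i = true
        ↔ decide (i < pvGreedy ss 0) = true) := by
    intro i hi
    rw [List.mem_range] at hi
    simp only [Function.comp_apply, decide_eq_true_eq]
    have e : 0 + 1 + i = i + 1 := by omega
    rw [e]
    rw [show ((pvF ss (i + 1) : Nat) : Int) < 80 ↔ pvF ss (i + 1) < 80 from by exact_mod_cast Iff.rfl]
    constructor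
    · intro hlt
      by_contra hge
      push Not at hge
      have hgn : pvGreedy ss 0 < ss.length := by omega
      have hstop := pvGreedy_stop ss 0 hgn
      have hmono : pvF ss (pvGreedy ss 0 + 1) ≤ pvF ss (i + 1) :=
        pvF_mono ss (by omega) (by omega)
      omega
    · intro hlt
      exact pvGreedy_lt_small ss 0 i (Nat.zero_le _) hlt
  rw [List.countP_congr hcongr, pvCountRange, Nat.min_eq_left hg.2]

-- the key equality between the two tail computations
theorem pvKey (ss : List (List Char)) :
    pvAWhile ss [] 0 =
      PySem.Chars.join ['/']
        (ss.take
          (((ss.foldl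
            (fun (st : Int × List Int) seg =>
              (st.1 + 1 + PySem.Chars.len seg, st.2 ++ [st.1 + 1 + PySem.Chars.len seg]))
            ((-1 : Int), ([] : List Int))).2).countP (fun L => L < 80))) := by
  have h1 := pvFoldl_scan ss (-1) []
  simp only [List.nil_append] at h1
  have h2 := pvScan_eq ss 0 (Nat.zero_le _)
  have ht : pvTOf ss 0 = -1 := by simp [pvTOf]
  simp only [List.drop_zero, Nat.sub_zero, ht] at h2
  have h3 := pvCount_eq_greedy ss
  have h4 := pvAWhile_eq ss 0 (Nat.zero_le _)
  simp only [List.take_zero, PySem.Chars.join_nil] at h4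
  rw [h1, h2, h3, h4]

-- the two if-chains after the ':'-truncation agree for every intermediate string q
theorem pvTail (q : List Char) :
    (if PySem.Chars.len q > 80 then
      if PySem.Chars.len (PySem.List.pyGetD (PySem.Chars.splitOn q ['/']) 0 []) > 80 then
        String.ofList
          (PySem.Chars.slice (PySem.List.pyGetD (PySem.Chars.splitOn q ['/']) 0 [])
            (some 0) (some 80))
      else String.ofList (pvAWhile (PySem.Chars.splitOn q ['/']) [] 0)
    else String.ofList q)
    = (if PySem.Chars.len q ≤ 80 then String.ofList q
      else
        if PySem.Chars.len (PySem.List.pyGetD (PySem.Chars.splitOn q ['/']) 0 []) > 80 then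
          String.ofList
            (PySem.Chars.slice (PySem.List.pyGetD (PySem.Chars.splitOn q ['/']) 0 [])
              (some 0) (some 80))
        else
          String.ofList
            (PySem.Chars.join ['/']
              ((PySem.Chars.splitOn q ['/']).take
                ((((PySem.Chars.splitOn q ['/']).foldl
                  (fun (st : Int × List Int) seg =>
                    (st.1 + 1 + PySem.Chars.len seg,
                      st.2 ++ [st.1 + 1 + PySem.Chars.len seg]))
                  ((-1 : Int), ([] : List Int))).2).countP (fun L => L < 80))))) := by
  by_cases h : PySem.Chars.len q > 80
  · have h' : ¬ PySem.Chars.len q ≤ 80 := by omega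
    rw [if_pos h, if_neg h']
    by_cases h0 : PySem.Chars.len (PySem.List.pyGetD (PySem.Chars.splitOn q ['/']) 0 []) > 80
    · simp only [if_pos h0]
    · simp only [if_neg h0]
      rw [pvKey]
  · have h' : PySem.Chars.len q ≤ 80 := by omega
    rw [if_neg h, if_pos h']

-- ===== VERDICT (by name: the statement is the Claim_ definition above) =====
theorem makeTopicPubSubSafe_spec : Claim_equal_makeTopicPubSubSafe := by
  intro path _
  unfold Spec_makeTopicPubSubSafe makeTopicPubSubSafe makeTopicPubSubSafe_alt
  exact pvTail _
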